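-- pv_equiv track=rewrite | github.com/bernardokrohn/IA | project.py | board_value
-- ===== SOURCE A (Python) =====
-- def c_peg():
--     return "O"
--
-- def c_empty():
--     return "_"
--
-- def is_empty(e):
--     return e == c_empty()
--
-- def is_peg(e):
--     return e == c_peg()
--
-- def board_value(board):
--
--     """
--     Examines the given board for number of pegs, empty spaces
--     number of pegs with no neighbours and number of corner placed pegs
--     """
--
--     pegs = 0
--     empty = 0
--     corner = 0
--     solo_pegs = 0
--     board_height = len(board)
--     board_width = len(board[0])
--
--     if is_peg(board[0][0]):
--         corner += 1
--     if is_peg(board[0][board_width-1]):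
--         corner += 1
--     if is_peg(board[board_height-1][0]):
--         corner += 1
--     if is_peg(board[board_height-1][board_width-1]):
--         corner += 1
--
--     for i in range(board_height):
--         for j in range(board_width):
--             if is_peg(board[i][j]):
--                 pegs += 1
--                 if (i > 0 and not(is_peg(board[i-1][j])) and
--                     j > 0 and not(is_peg(board[i][j-1])) and
--                     i < board_height - 1 and not(is_peg(board[i+1][j])) and
--                     j < board_width - 1 and not(is_peg(board[i][j+1]))):
--
--                     solo_pegs += 1
--             elif is_empty(board[i][j]):
--                 empty += 1
--
--     return (pegs, empty, corner, solo_pegs)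
-- ===== SOURCE B (Python) =====
-- def board_value(board):
--     """
--     Examines the given board for number of pegs, empty spaces
--     number of pegs with no neighbours and number of corner placed pegs
--     """
--     h = len(board)
--     w = len(board[0])
--     pegs = sum(row[:w].count("O") for row in board)
--     empty = sum(row[:w].count("_") for row in board)
--     corner = [board[0][0], board[0][w - 1], board[h - 1][0], board[h - 1][w - 1]].count("O")
--     solo_pegs = 0
--     for i in range(1, h - 1):
--         for j in range(1, w - 1):
--             if (board[i][j] == "O" and board[i - 1][j] != "O" and board[i + 1][j] != "O"
--                     and board[i][j - 1] != "O" and board[i][j + 1] != "O"):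
--                 solo_pegs += 1
--     return (pegs, empty, corner, solo_pegs)
-- ===== Notes on version B (the rewrite author's own statement) =====
-- stated objective: simpler
-- what changed: Replaces A's single combined scan with a triple accumulator by specialised passes: per-row slice-and-count for pegs and empties, a 4-element list count for corners, and a solo-peg loop restricted to interior cells only.
import Mathlib
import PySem

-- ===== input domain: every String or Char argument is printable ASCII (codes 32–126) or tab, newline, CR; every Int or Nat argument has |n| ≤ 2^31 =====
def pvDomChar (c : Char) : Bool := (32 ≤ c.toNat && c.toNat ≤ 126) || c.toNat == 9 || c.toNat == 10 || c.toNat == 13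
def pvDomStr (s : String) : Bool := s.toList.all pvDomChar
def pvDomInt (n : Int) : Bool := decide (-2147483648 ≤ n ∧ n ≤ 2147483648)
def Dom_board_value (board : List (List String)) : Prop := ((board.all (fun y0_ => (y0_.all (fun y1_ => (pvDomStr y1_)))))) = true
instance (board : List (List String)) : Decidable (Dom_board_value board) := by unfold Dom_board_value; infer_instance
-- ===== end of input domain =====

-- B restructures A's single combined scan into specialised passes (row counts, corner-list count, interior-only solo loop); return values proved equal on Pre_.

-- shared helpers (cell access with Python indexing; peg/empty tests from the module)
def bvCell (board : List (List String)) (i j : Int) : String :=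
  PySem.List.pyGetD (PySem.List.pyGetD board i []) j ""

def bvIsPeg (e : String) : Bool := e == "O"

def bvIsEmpty (e : String) : Bool := e == "_"

-- ===== PORT A =====
def board_value (board : List (List String)) : Int × Int × Int × Int :=
  let bh : Int := board.length
  let bw : Int := (PySem.List.pyGetD board 0 []).length
  let corner : Int :=
    (if bvIsPeg (bvCell board 0 0) then 1 else 0) +
    (if bvIsPeg (bvCell board 0 (bw - 1)) then 1 else 0) +
    (if bvIsPeg (bvCell board (bh - 1) 0) then 1 else 0) +
    (if bvIsPeg (bvCell board (bh - 1) (bw - 1)) then 1 else 0)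
  let st : Int × Int × Int :=
    (PySem.List.pyRange 0 bh).foldl (fun st i =>
      (PySem.List.pyRange 0 bw).foldl (fun st j =>
        if bvIsPeg (bvCell board i j) then
          if (decide (0 < i) && !bvIsPeg (bvCell board (i - 1) j) &&
              decide (0 < j) && !bvIsPeg (bvCell board i (j - 1)) &&
              decide (i < bh - 1) && !bvIsPeg (bvCell board (i + 1) j) &&
              decide (j < bw - 1) && !bvIsPeg (bvCell board i (j + 1))) then
            (st.1 + 1, st.2.1, st.2.2 + 1)
          else
            (st.1 + 1, st.2.1, st.2.2)
        else if bvIsEmpty (bvCell board i j) then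
          (st.1, st.2.1 + 1, st.2.2)
        else st) st) ((0 : Int), (0 : Int), (0 : Int))
  (st.1, st.2.1, corner, st.2.2)

-- ===== PORT B =====
def board_value_alt (board : List (List String)) : Int × Int × Int × Int :=
  let h : Int := board.length
  let w : Int := (PySem.List.pyGetD board 0 []).length
  let pegs : Int := (board.map (fun row => ((PySem.List.slice row none (some w)).count "O" : Int))).sum
  let empty : Int := (board.map (fun row => ((PySem.List.slice row none (some w)).count "_" : Int))).sum
  let corner : Int :=
    (([bvCell board 0 0, bvCell board 0 (w - 1),
       bvCell board (h - 1) 0, bvCell board (h - 1) (w - 1)] : List String).count "O" : Int)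
  let solo : Int :=
    (PySem.List.pyRange 1 (h - 1)).foldl (fun acc i =>
      (PySem.List.pyRange 1 (w - 1)).foldl (fun acc j =>
        if (bvCell board i j == "O" && bvCell board (i - 1) j != "O" &&
            bvCell board (i + 1) j != "O" && bvCell board i (j - 1) != "O" &&
            bvCell board i (j + 1) != "O") then acc + 1 else acc) acc) 0
  (pegs, empty, corner, solo)

-- ===== PRECONDITION & SPEC =====
-- Pre_ excludes exactly the inputs where A raises IndexError: the empty board, a board whose
-- first row is empty, and ragged boards with some row shorter than the first row.
def Pre_board_value (board : List (List String)) : Prop :=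
  board ≠ [] ∧ 0 < (board.headD []).length ∧
    ∀ row ∈ board, (board.headD []).length ≤ row.length
instance (board : List (List String)) : Decidable (Pre_board_value board) := by
  unfold Pre_board_value; infer_instance

def pvWitness_board_value : List (List String) := [["O", "_"], ["_", "O"]]

def Spec_board_value (board : List (List String)) (out : Int × Int × Int × Int) : Prop := out = board_value_alt board
instance (board : List (List String)) (out : Int × Int × Int × Int) : Decidable (Spec_board_value board out) := by unfold Spec_board_value; infer_instance

-- ===== CLAIM (what is proved, stated in full; the proofs are below) =====
def Claim_equal_board_value : Prop := ∀ (board : List (List String)), Dom_board_value board → Pre_board_value board → Spec_board_value board (board_value board)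

-- ===== LEMMAS AND PROOFS =====

theorem tri_foldl {α : Type} (p q r : α → Bool) (hpq : ∀ x, p x = true → q x = false)
    (l : List α) (a b c : Int) :
    l.foldl (fun st x =>
      if p x then (if r x then (st.1 + 1, st.2.1, st.2.2 + 1) else (st.1 + 1, st.2.1, st.2.2))
      else if q x then (st.1, st.2.1 + 1, st.2.2) else st) (a, b, c)
    = (a + (l.countP p : Int), b + (l.countP q : Int),
       c + (l.countP (fun x => p x && r x) : Int)) := by
  induction l generalizing a b c with
  | nil => simp
  | cons x t ih =>
    by_cases hp : p x = true
    · have hq := hpq x hp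
      by_cases hr : r x = true <;>
        simp [hp, hq, hr, ih] <;> omega
    · by_cases hq : q x = true
      · simp [hp, hq, ih]
        omega
      · simp [hp, hq, ih]

theorem tri_foldl_add {α : Type} (f g k : α → Int) (l : List α) (a b c : Int) :
    l.foldl (fun st x => (st.1 + f x, st.2.1 + g x, st.2.2 + k x)) (a, b, c)
    = (a + (l.map f).sum, b + (l.map g).sum, c + (l.map k).sum) := by
  induction l generalizing a b c with
  | nil => simp
  | cons x t ih => simp [ih]; refine ⟨by ring, by ring, by ring⟩

theorem countP_range_getD {α : Type} (l : List α) (d : α) (p : α → Bool) (n : Nat)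
    (hn : n ≤ l.length) :
    (List.range n).countP (fun j => p (l.getD j d)) = (l.take n).countP p := by
  induction n with
  | zero => simp
  | succ m ih =>
    rw [List.range_succ, List.countP_append, ih (by omega), List.take_add_one,
      List.countP_append]
    have hm : m < l.length := by omega
    simp [List.getD_eq_getElem?_getD, List.getElem?_eq_getElem hm, List.countP_cons]

theorem map_getD_range {α β : Type} (l : List α) (d : α) (F : α → β) :
    (List.range l.length).map (fun i => F (l.getD i d)) = l.map F := by
  apply List.ext_getElem
  · simp
  · intro i h1 h2
    have hi : i < l.length := by simpa using h2
    simp [List.getD_eq_getElem?_getD, List.getElem?_eq_getElem hi]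

theorem pyRange_shift (a : Int) (n : Nat) :
    PySem.List.pyRange a (a + n) = (List.range n).map (fun k : Nat => a + (k : Int)) := by
  induction n with
  | zero => simp [PySem.List.pyRange]
  | succ m ih =>
    have h : (a + (m + 1 : Nat) : Int) = (a + m) + 1 := by push_cast; ring
    rw [h, PySem.List.pyRange_one_succ_right (by omega), ih, List.range_succ]
    simp

theorem countP_range_interior (p : Nat → Bool) (n : Nat) :
    (List.range n).countP (fun j => decide (0 < j) && decide (j + 1 < n) && p j)
    = (List.range (n - 2)).countP (fun k => p (k + 1)) := by
  match n with
  | 0 => simp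
  | 1 => simp
  | m + 2 =>
    rw [List.range_succ_eq_map, List.countP_cons, List.range_succ, List.map_append,
      List.countP_append]
    simp [List.countP_map]
    apply List.countP_congr
    intro k hk
    have : k < m := List.mem_range.mp hk
    simp [Nat.succ_eq_add_one]
    omega

theorem sum_range_interior (g : Nat → Int) (n : Nat) :
    ((List.range n).map (fun i => if 0 < i ∧ i + 1 < n then g i else 0)).sum
    = ((List.range (n - 2)).map (fun k => g (k + 1))).sum := by
  match n with
  | 0 => simp
  | 1 => simp
  | m + 2 =>
    rw [List.range_succ_eq_map, List.range_succ]
    simp only [List.map_cons, List.map_append, List.map_map, List.sum_cons, List.sum_append]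
    have h3 : (List.range m).map ((fun i => if 0 < i ∧ i + 1 < m + 2 then g i else 0) ∘ Nat.succ)
        = (List.range m).map (fun k => g (k + 1)) := by
      apply List.map_congr_left
      intro k hk
      have : k < m := List.mem_range.mp hk
      have hc : (0 < k + 1 ∧ k + 1 + 1 < m + 2) := by omega
      simp only [Function.comp, Nat.succ_eq_add_one, if_pos hc]
    rw [h3]
    simp

theorem pyRange_nil {a b : Int} (h : b ≤ a) : PySem.List.pyRange a b = [] := by
  simp [PySem.List.pyRange]; omega


theorem bv_hpq : ∀ s : String, bvIsPeg s = true → bvIsEmpty s = false := by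
  intro s hs
  simp [bvIsPeg, beq_iff_eq] at hs
  simp [bvIsEmpty, hs]

theorem A_fold (board : List (List String)) (bh bw : Int) :
    (PySem.List.pyRange 0 bh).foldl (fun st i =>
      (PySem.List.pyRange 0 bw).foldl (fun st j =>
        if bvIsPeg (bvCell board i j) then
          if (decide (0 < i) && !bvIsPeg (bvCell board (i - 1) j) &&
              decide (0 < j) && !bvIsPeg (bvCell board i (j - 1)) &&
              decide (i < bh - 1) && !bvIsPeg (bvCell board (i + 1) j) &&
              decide (j < bw - 1) && !bvIsPeg (bvCell board i (j + 1))) then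
            (st.1 + 1, st.2.1, st.2.2 + 1)
          else
            (st.1 + 1, st.2.1, st.2.2)
        else if bvIsEmpty (bvCell board i j) then
          (st.1, st.2.1 + 1, st.2.2)
        else st) st) ((0 : Int), (0 : Int), (0 : Int))
    = (((PySem.List.pyRange 0 bh).map (fun i =>
          (((PySem.List.pyRange 0 bw).countP (fun j => bvIsPeg (bvCell board i j))) : Int))).sum,
       ((PySem.List.pyRange 0 bh).map (fun i =>
          (((PySem.List.pyRange 0 bw).countP (fun j => bvIsEmpty (bvCell board i j))) : Int))).sum,
       ((PySem.List.pyRange 0 bh).map (fun i =>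
          (((PySem.List.pyRange 0 bw).countP (fun j => bvIsPeg (bvCell board i j) &&
            (decide (0 < i) && !bvIsPeg (bvCell board (i - 1) j) &&
             decide (0 < j) && !bvIsPeg (bvCell board i (j - 1)) &&
             decide (i < bh - 1) && !bvIsPeg (bvCell board (i + 1) j) &&
             decide (j < bw - 1) && !bvIsPeg (bvCell board i (j + 1))))) : Int))).sum) := by
  have hfun : (fun (st : Int × Int × Int) (i : Int) =>
      (PySem.List.pyRange 0 bw).foldl (fun st j =>
        if bvIsPeg (bvCell board i j) then
          if (decide (0 < i) && !bvIsPeg (bvCell board (i - 1) j) &&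
              decide (0 < j) && !bvIsPeg (bvCell board i (j - 1)) &&
              decide (i < bh - 1) && !bvIsPeg (bvCell board (i + 1) j) &&
              decide (j < bw - 1) && !bvIsPeg (bvCell board i (j + 1))) then
            (st.1 + 1, st.2.1, st.2.2 + 1)
          else
            (st.1 + 1, st.2.1, st.2.2)
        else if bvIsEmpty (bvCell board i j) then
          (st.1, st.2.1 + 1, st.2.2)
        else st) st)
      = (fun st i =>
          (st.1 + (((PySem.List.pyRange 0 bw).countP (fun j => bvIsPeg (bvCell board i j))) : Int),
           st.2.1 + (((PySem.List.pyRange 0 bw).countP (fun j => bvIsEmpty (bvCell board i j))) : Int),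
           st.2.2 + (((PySem.List.pyRange 0 bw).countP (fun j => bvIsPeg (bvCell board i j) &&
             (decide (0 < i) && !bvIsPeg (bvCell board (i - 1) j) &&
              decide (0 < j) && !bvIsPeg (bvCell board i (j - 1)) &&
              decide (i < bh - 1) && !bvIsPeg (bvCell board (i + 1) j) &&
              decide (j < bw - 1) && !bvIsPeg (bvCell board i (j + 1))))) : Int))) := by
    funext st i
    obtain ⟨a, b, c⟩ := st
    exact tri_foldl _ _ _ (fun x hx => bv_hpq _ hx) _ a b c
  rw [hfun, tri_foldl_add]
  simp

theorem B_fold (board : List (List String)) (a b : Int) :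
    (PySem.List.pyRange 1 a).foldl (fun acc i =>
      (PySem.List.pyRange 1 b).foldl (fun acc j =>
        if (bvCell board i j == "O" && bvCell board (i - 1) j != "O" &&
            bvCell board (i + 1) j != "O" && bvCell board i (j - 1) != "O" &&
            bvCell board i (j + 1) != "O") then acc + 1 else acc) acc) 0
    = ((PySem.List.pyRange 1 a).map (fun i =>
        (((PySem.List.pyRange 1 b).countP (fun j =>
          bvCell board i j == "O" && bvCell board (i - 1) j != "O" &&
          bvCell board (i + 1) j != "O" && bvCell board i (j - 1) != "O" &&
          bvCell board i (j + 1) != "O")) : Int))).sum := by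
  have hfun : (fun (acc : Int) (i : Int) =>
      (PySem.List.pyRange 1 b).foldl (fun acc j =>
        if (bvCell board i j == "O" && bvCell board (i - 1) j != "O" &&
            bvCell board (i + 1) j != "O" && bvCell board i (j - 1) != "O" &&
            bvCell board i (j + 1) != "O") then acc + 1 else acc) acc)
      = (fun acc i => acc + (((PySem.List.pyRange 1 b).countP (fun j =>
          bvCell board i j == "O" && bvCell board (i - 1) j != "O" &&
          bvCell board (i + 1) j != "O" && bvCell board i (j - 1) != "O" &&
          bvCell board i (j + 1) != "O")) : Int)) := by
    funext acc i
    exact PySem.List.foldl_count_if _ _ _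
  rw [hfun, PySem.List.foldl_add]
  simp


theorem count_pass (board : List (List String)) (c : String)
    (hrows : ∀ row ∈ board, (board.headD []).length ≤ row.length) :
    ((List.range board.length).map (fun i =>
        (((List.range (board.headD []).length).countP
          (fun j => (board.getD i []).getD j "" == c)) : Int))).sum
    = (board.map (fun row =>
        ((row.take (board.headD []).length).count c : Int))).sum := by
  rw [map_getD_range board [] (fun row =>
    (((List.range (board.headD []).length).countP (fun j => row.getD j "" == c)) : Int))]
  congr 1
  apply List.map_congr_left
  intro row hrow
  rw [countP_range_getD row "" (· == c) _ (hrows row hrow)]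
  rfl


theorem solo_body_congr (cell : Int → Int → String) (k m : Nat) :
    (cell (1 + ↑k) (1 + ↑m) == "O" && cell (1 + ↑k - 1) (1 + ↑m) != "O" &&
     cell (1 + ↑k + 1) (1 + ↑m) != "O" && cell (1 + ↑k) (1 + ↑m - 1) != "O" &&
     cell (1 + ↑k) (1 + ↑m + 1) != "O")
    = (cell ↑(k + 1) ↑(m + 1) == "O" && !(cell (↑(k + 1) - 1) ↑(m + 1) == "O") &&
       !(cell (↑(k + 1) + 1) ↑(m + 1) == "O") && !(cell ↑(k + 1) (↑(m + 1) - 1) == "O") &&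
       !(cell ↑(k + 1) (↑(m + 1) + 1) == "O")) := by
  have e1 : (1 : Int) + ↑k = ((k + 1 : Nat) : Int) := by push_cast; ring
  have f1 : (1 : Int) + ↑m = ((m + 1 : Nat) : Int) := by push_cast; ring
  simp only [bne, e1, f1]

theorem map_pyRange_one {b : Type} (F : Int → b) (n : Nat) :
    (PySem.List.pyRange 1 (1 + (n : Int))).map F = (List.range n).map (fun k => F (1 + ↑k)) := by
  rw [pyRange_shift, List.map_map]
  rfl

theorem countP_pyRange_one (p : Int → Bool) (n : Nat) :
    (PySem.List.pyRange 1 (1 + (n : Int))).countP p = (List.range n).countP (fun k => p (1 + ↑k)) := by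
  rw [pyRange_shift, List.countP_map]
  rfl

theorem solo_pass (cell : Int → Int → String) (h w : Nat) :
    (List.map (fun i =>
      (((PySem.List.pyRange 0 (w : Int)).countP (fun j =>
        cell i j == "O" &&
          (decide (0 < i) && !(cell (i - 1) j == "O") &&
           decide (0 < j) && !(cell i (j - 1) == "O") &&
           decide (i < (h : Int) - 1) && !(cell (i + 1) j == "O") &&
           decide (j < (w : Int) - 1) && !(cell i (j + 1) == "O")))) : Int))
      (PySem.List.pyRange 0 (h : Int))).sum
    = (List.map (fun i =>
        (((PySem.List.pyRange 1 ((w : Int) - 1)).countP (fun j =>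
          cell i j == "O" && cell (i - 1) j != "O" && cell (i + 1) j != "O" &&
          cell i (j - 1) != "O" && cell i (j + 1) != "O")) : Int))
        (PySem.List.pyRange 1 ((h : Int) - 1))).sum := by
  -- the interior-only body, at Nat indices
  have hA : ∀ i : Nat,
      (List.range w).countP (fun j : Nat =>
        cell ↑i ↑j == "O" &&
          (decide ((0:Int) < ↑i) && !(cell (↑i - 1) ↑j == "O") &&
           decide ((0:Int) < ↑j) && !(cell ↑i (↑j - 1) == "O") &&
           decide ((↑i:Int) < ↑h - 1) && !(cell (↑i + 1) ↑j == "O") &&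
           decide ((↑j:Int) < ↑w - 1) && !(cell ↑i (↑j + 1) == "O")))
      = if 0 < i ∧ i + 1 < h then
          (List.range (w - 2)).countP (fun m : Nat =>
            cell ↑i ↑(m + 1) == "O" && !(cell (↑i - 1) ↑(m + 1) == "O") &&
            !(cell (↑i + 1) ↑(m + 1) == "O") && !(cell ↑i (↑(m + 1) - 1) == "O") &&
            !(cell ↑i (↑(m + 1) + 1) == "O"))
        else 0 := by
    intro i
    by_cases hi : 0 < i ∧ i + 1 < h
    · rw [if_pos hi]
      rw [List.countP_congr (q := fun j : Nat =>
          decide (0 < j) && decide (j + 1 < w) &&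
          (cell ↑i ↑j == "O" && !(cell (↑i - 1) ↑j == "O") &&
           !(cell (↑i + 1) ↑j == "O") && !(cell ↑i (↑j - 1) == "O") &&
           !(cell ↑i (↑j + 1) == "O")))]
      · exact countP_range_interior _ w
      · intro j hj
        have hjw : j < w := List.mem_range.mp hj
        simp only [Bool.and_eq_true, decide_eq_true_eq, Bool.not_eq_true', and_assoc]
        constructor
        · rintro ⟨hp, hd1, hn1, hd2, hn2, hd3, hn3, hd4, hn4⟩
          exact ⟨by omega, by omega, hp, hn1, hn3, hn2, hn4⟩
        · rintro ⟨hj0, hjw1, hp, hup, hdown, hleft, hright⟩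
          exact ⟨hp, by omega, hup, by omega, hleft, by omega, hdown, by omega, hright⟩
    · rw [if_neg hi]
      rw [List.countP_eq_zero]
      intro j hj
      simp only [Bool.and_eq_true, decide_eq_true_eq, Bool.not_eq_true', and_assoc]
      rintro ⟨-, hd1, -, -, -, hd3, -⟩
      exact hi ⟨by omega, by omega⟩
  -- LHS to Nat ranges
  rw [PySem.List.pyRange_zero_natCast h, PySem.List.pyRange_zero_natCast w]
  simp only [List.map_map, List.countP_map, Function.comp_def]
  rw [List.map_congr_left (fun i (_ : i ∈ List.range h) => congrArg (fun n : Nat => (n : Int)) (hA i))]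
  by_cases hh : 2 ≤ h
  · have hhe : ((h : Int) - 1) = 1 + ((h - 2 : Nat) : Int) := by omega
    rw [hhe, map_pyRange_one]
    by_cases hw : 2 ≤ w
    · have hwe : ((w : Int) - 1) = 1 + ((w - 2 : Nat) : Int) := by omega
      simp only [hwe, countP_pyRange_one]
      have hsplit : ∀ i : Nat, ((if 0 < i ∧ i + 1 < h then
            (List.range (w - 2)).countP (fun m : Nat =>
              cell ↑i ↑(m + 1) == "O" && !(cell (↑i - 1) ↑(m + 1) == "O") &&
              !(cell (↑i + 1) ↑(m + 1) == "O") && !(cell ↑i (↑(m + 1) - 1) == "O") &&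
              !(cell ↑i (↑(m + 1) + 1) == "O"))
          else 0 : Nat) : Int)
          = if 0 < i ∧ i + 1 < h then
              (((List.range (w - 2)).countP (fun m : Nat =>
              cell ↑i ↑(m + 1) == "O" && !(cell (↑i - 1) ↑(m + 1) == "O") &&
              !(cell (↑i + 1) ↑(m + 1) == "O") && !(cell ↑i (↑(m + 1) - 1) == "O") &&
              !(cell ↑i (↑(m + 1) + 1) == "O"))) : Int)
            else 0 := by
        intro i; split <;> simp
      simp only [hsplit]
      rw [sum_range_interior]
      congr 1
      apply List.map_congr_left
      intro k _
      congr 1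
      apply List.countP_congr
      intro m _
      rw [solo_body_congr cell k m]
    · have hwz : w - 2 = 0 := by omega
      have hwe : ((w : Int) - 1) ≤ 1 := by omega
      rw [hwz, pyRange_nil hwe]
      simp
  · have hhz : h - 2 = 0 := by omega
    have hhe : ((h : Int) - 1) ≤ 1 := by omega
    rw [pyRange_nil hhe]
    simp only [List.map_nil, List.sum_nil]
    apply List.sum_eq_zero
    intro x hx
    simp only [List.mem_map, List.mem_range] at hx
    obtain ⟨i, hi, hix⟩ := hx
    have hni : ¬(0 < i ∧ i + 1 < h) := by omega
    rw [← hix, if_neg hni]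
    simp

theorem board_value_spec : Claim_equal_board_value := by
  intro board _ hpre
  obtain ⟨hne, hw0, hrows⟩ := hpre
  unfold Spec_board_value board_value board_value_alt
  have hg0 : PySem.List.pyGetD board 0 [] = board.headD [] := by
    cases board with
    | nil => simp at hne
    | cons r t => simp [PySem.List.pyGetD]
  dsimp only
  rw [hg0, A_fold, B_fold]
  simp only [Prod.mk.injEq]
  refine ⟨?_, ?_, ?_, ?_⟩
  · have hsl : ∀ (row : List String),
        PySem.List.slice row none (some (((board.headD []).length : Nat) : Int))
          = row.take (board.headD []).length := by
      intro row
      rw [PySem.List.slice_to row (Int.natCast_nonneg _)]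
      simp
    simp only [PySem.List.pyRange_zero_natCast, List.map_map, List.countP_map,
      Function.comp_def, bvCell, bvIsPeg, PySem.List.pyGetD_natCast, hsl]
    exact count_pass board "O" hrows
  · have hsl : ∀ (row : List String),
        PySem.List.slice row none (some (((board.headD []).length : Nat) : Int))
          = row.take (board.headD []).length := by
      intro row
      rw [PySem.List.slice_to row (Int.natCast_nonneg _)]
      simp
    simp only [PySem.List.pyRange_zero_natCast, List.map_map, List.countP_map,
      Function.comp_def, bvCell, bvIsEmpty, PySem.List.pyGetD_natCast, hsl]
    exact count_pass board "_" hrows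
  · simp only [bvIsPeg, List.count_cons, List.count_nil]
    split_ifs <;> simp_all
  · simp only [bvIsPeg]
    exact solo_pass (bvCell board) board.length (board.headD []).length
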